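-- pv_equiv track=rewrite | github.com/ProjectSeventy/TildeSummariser | tilde/utils/components/C99Segmenter.py | _merge_lemma_dictionaries
-- ===== SOURCE A (Python) =====
-- def _merge_lemma_dictionaries(all_lemma_freqs):
--     """Merge several lemma frequency dictionaries into one"""
--
--     lemma_freqs = {}
--     for i in range(0, len(all_lemma_freqs)):
--         for word in all_lemma_freqs[i].keys():
--             lemma_freqs[word] = lemma_freqs.get(word, [0]*i)
--             lemma_freqs[word].append(all_lemma_freqs[i][word])
--         for word in lemma_freqs.keys():
--             if word not in all_lemma_freqs[i].keys():
--                 lemma_freqs[word].append(0)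
--
--     return lemma_freqs
-- ===== SOURCE B (Python) =====
-- def _merge_lemma_dictionaries(all_lemma_freqs):
--     """Merge several lemma frequency dictionaries into one"""
--     seen = {}
--     for d in all_lemma_freqs:
--         for word in d:
--             seen.setdefault(word, None)
--     return {word: [d.get(word, 0) for d in all_lemma_freqs] for word in seen}
-- ===== Notes on version B (the rewrite author's own statement) =====
-- stated objective: simpler
-- what changed: Replaces A's dict-major incremental padding (append the count for each word of the current dictionary, then rescan every known word to append zeros) by first collecting the union of words in first-appearance order and then building each word's full count row in one comprehension with d.get(word, 0).
import Mathlib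
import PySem

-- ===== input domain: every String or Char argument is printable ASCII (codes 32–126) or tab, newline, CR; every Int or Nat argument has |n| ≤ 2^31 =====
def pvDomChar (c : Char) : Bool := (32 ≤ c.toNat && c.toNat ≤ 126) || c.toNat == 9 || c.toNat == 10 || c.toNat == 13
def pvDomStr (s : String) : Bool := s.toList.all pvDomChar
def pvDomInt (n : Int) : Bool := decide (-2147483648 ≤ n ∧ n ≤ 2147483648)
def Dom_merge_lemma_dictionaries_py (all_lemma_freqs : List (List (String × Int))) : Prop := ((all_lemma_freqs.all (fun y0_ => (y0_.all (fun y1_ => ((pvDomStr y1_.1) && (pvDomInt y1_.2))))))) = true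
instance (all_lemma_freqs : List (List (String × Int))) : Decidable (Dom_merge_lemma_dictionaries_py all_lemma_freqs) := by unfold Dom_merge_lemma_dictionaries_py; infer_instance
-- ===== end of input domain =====

-- B computes the word union first and then builds each count row in one pass with d.get(word, 0),
-- instead of A's dict-major incremental padding; objective: simpler.

-- ===== PORT A =====
def merge_lemma_dictionaries_py (all_lemma_freqs : List (List (String × Int))) : List (String × List Int) :=
  let lemma_freqs : PySem.Dict String (List Int) :=
    (PySem.List.pyRange 0 all_lemma_freqs.length 1).foldl (fun lemma_freqs i =>
      let d := PySem.Dict.ofList ((PySem.List.pyGet? all_lemma_freqs i).getD [])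
      -- for word in all_lemma_freqs[i].keys(): lemma_freqs[word] = lemma_freqs.get(word, [0]*i); lemma_freqs[word].append(...)
      let lemma_freqs := d.keys.foldl (fun lf word =>
        lf.insert word (lf.getD word (List.replicate i.toNat 0) ++ [d.getD word 0])) lemma_freqs
      -- for word in lemma_freqs.keys(): if word not in all_lemma_freqs[i].keys(): lemma_freqs[word].append(0)
      lemma_freqs.keys.foldl (fun lf word =>
        if d.contains word = false then lf.modify word [] (· ++ [0]) else lf) lemma_freqs)
      PySem.Dict.empty
  lemma_freqs.items

-- ===== PORT B =====
def merge_lemma_dictionaries_py_alt (all_lemma_freqs : List (List (String × Int))) : List (String × List Int) :=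
  let seen : PySem.Set String :=
    all_lemma_freqs.foldl (fun s d =>
      (PySem.Dict.ofList d).keys.foldl (fun s word => PySem.Set.add s word) s) PySem.Set.empty
  seen.map (fun word =>
    (word, all_lemma_freqs.map (fun d => (PySem.Dict.ofList d).getD word 0)))

-- ===== PRECONDITION & SPEC =====
def Spec_merge_lemma_dictionaries_py (all_lemma_freqs : List (List (String × Int))) (out : List (String × List Int)) : Prop := out = merge_lemma_dictionaries_py_alt all_lemma_freqs
instance (all_lemma_freqs : List (List (String × Int))) (out : List (String × List Int)) : Decidable (Spec_merge_lemma_dictionaries_py all_lemma_freqs out) := by unfold Spec_merge_lemma_dictionaries_py; infer_instance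

-- ===== CLAIM (what is proved, stated in full; the proofs are below) =====
def Claim_equal_merge_lemma_dictionaries_py : Prop := ∀ (all_lemma_freqs : List (List (String × Int))), Dom_merge_lemma_dictionaries_py all_lemma_freqs → Spec_merge_lemma_dictionaries_py all_lemma_freqs (merge_lemma_dictionaries_py all_lemma_freqs)

-- ===== LEMMAS AND PROOFS =====

-- A's loop body for dictionary number i, as a named step function (proof-side only).
def pvStepA (dl : List (String × Int)) (i : Nat) (lf : PySem.Dict String (List Int)) : PySem.Dict String (List Int) :=
  let d := PySem.Dict.ofList dl
  let lf := d.keys.foldl (fun lf word =>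
    lf.insert word (lf.getD word (List.replicate i 0) ++ [d.getD word 0])) lf
  lf.keys.foldl (fun lf word =>
    if d.contains word = false then lf.modify word [] (· ++ [0]) else lf) lf

-- A's outer loop as structural recursion over the remaining dictionaries, carrying the index.
def pvGoA : List (List (String × Int)) → Nat → PySem.Dict String (List Int) → PySem.Dict String (List Int)
  | [], _, lf => lf
  | dl :: rest, k, lf => pvGoA rest (k + 1) (pvStepA dl k lf)

-- B's union of words in first-appearance order.
def pvUnion (all : List (List (String × Int))) : PySem.Set String :=
  all.foldl (fun s d => (PySem.Dict.ofList d).keys.foldl (fun s word => PySem.Set.add s word) s) PySem.Set.empty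

-- B's count row for one word.
def pvRow (all : List (List (String × Int))) (w : String) : List Int :=
  all.map (fun d => (PySem.Dict.ofList d).getD w 0)

theorem pvUnion_append_singleton (ps : List (List (String × Int))) (dl : List (String × Int)) :
    pvUnion (ps ++ [dl]) = PySem.Set.update (pvUnion ps) (PySem.Dict.ofList dl).keys := by
  simp [pvUnion, List.foldl_append, PySem.Set.update]

theorem pvMem_union (ps : List (List (String × Int))) (w : String) :
    w ∈ pvUnion ps ↔ ∃ dl ∈ ps, w ∈ (PySem.Dict.ofList dl).keys := by
  induction ps using List.reverseRecOn with
  | nil => simp [pvUnion, PySem.Set.empty]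
  | append_singleton ps dl ih =>
      rw [pvUnion_append_singleton]
      simp only [PySem.Set.mem_update, ih, List.mem_append, List.mem_singleton]
      constructor
      · rintro (⟨d, hd, hm⟩ | hm)
        · exact ⟨d, Or.inl hd, hm⟩
        · exact ⟨dl, Or.inr rfl, hm⟩
      · rintro ⟨d, hd | rfl, hm⟩
        · exact Or.inl ⟨d, hd, hm⟩
        · exact Or.inr hm

theorem pvUnion_nodup (ps : List (List (String × Int))) : (pvUnion ps).Nodup := by
  induction ps using List.reverseRecOn with
  | nil => simp [pvUnion, PySem.Set.empty]
  | append_singleton ps dl ih =>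
      rw [pvUnion_append_singleton]
      exact PySem.Set.nodup_update _ _ ih

theorem pvRow_append_singleton (ps : List (List (String × Int))) (dl : List (String × Int)) (w : String) :
    pvRow (ps ++ [dl]) w = pvRow ps w ++ [(PySem.Dict.ofList dl).getD w 0] := by
  simp [pvRow]

theorem pvRow_eq_replicate (ps : List (List (String × Int))) (w : String)
    (h : w ∉ pvUnion ps) : pvRow ps w = List.replicate ps.length 0 := by
  rw [pvRow, List.map_eq_replicate_iff]
  intro d hd
  refine PySem.Dict.getD_of_not_contains _ _ ?_
  have : ¬ (PySem.Dict.ofList d).contains w = true := by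
    rw [PySem.Dict.contains_iff_mem_keys]
    exact fun hm => h ((pvMem_union ps w).2 ⟨d, hd, hm⟩)
  simpa using this

-- getD through A's first inner loop (distinct keys: each key is written at most once).
theorem pvFold1_getD (ks : List String) (hnd : ks.Nodup) (lf : PySem.Dict String (List Int))
    (r0 : List Int) (g : String → Int) (w : String) (d' : List Int) :
    (ks.foldl (fun lf word => lf.insert word (lf.getD word r0 ++ [g word])) lf).getD w d'
      = if w ∈ ks then lf.getD w r0 ++ [g w] else lf.getD w d' := by
  induction ks generalizing lf with
  | nil => simp
  | cons k rest ih =>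
      obtain ⟨hk, hrest⟩ := List.nodup_cons.mp hnd
      rw [List.foldl_cons, ih hrest]
      by_cases hw : w ∈ rest
      · have hwk : w ≠ k := fun h => hk (h ▸ hw)
        simp [hw, hwk, PySem.Dict.getD_insert]
      · by_cases hwk : w = k
        · subst hwk
          simp [hw]
        · simp [hw, hwk, PySem.Dict.getD_insert]

-- keys are unchanged by A's second inner loop (every visited word is already a key).
theorem pvFold2_keys (ks : List String) (c : String → Bool) :
    ∀ lf : PySem.Dict String (List Int), (∀ x ∈ ks, lf.contains x = true) →
    (ks.foldl (fun lf word => if c word = false then lf.modify word [] (· ++ [0]) else lf) lf).keys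
      = lf.keys := by
  induction ks with
  | nil => intro lf _; rfl
  | cons k rest ih =>
      intro lf hsub
      rw [List.foldl_cons]
      by_cases hc : c k = false
      · rw [if_pos hc]
        have hkeq : (lf.modify k [] (· ++ [0])).keys = lf.keys := by
          rw [PySem.Dict.keys_modify]
          exact PySem.Dict.keys_insert_of_contains _ _ (hsub k (List.mem_cons_self ..))
        rw [ih _ (by
          intro x hx
          rw [PySem.Dict.contains_iff_mem_keys, hkeq, ← PySem.Dict.contains_iff_mem_keys]
          exact hsub x (List.mem_cons_of_mem _ hx)), hkeq]
      · rw [if_neg hc]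
        exact ih _ (fun x hx => hsub x (List.mem_cons_of_mem _ hx))

-- getD through A's second inner loop (distinct keys).
theorem pvFold2_getD (ks : List String) (hnd : ks.Nodup) (c : String → Bool)
    (lf : PySem.Dict String (List Int)) (w : String) (d' : List Int) :
    (ks.foldl (fun lf word => if c word = false then lf.modify word [] (· ++ [0]) else lf) lf).getD w d'
      = if w ∈ ks ∧ c w = false then lf.getD w [] ++ [0] else lf.getD w d' := by
  induction ks generalizing lf with
  | nil => simp
  | cons k rest ih =>
      obtain ⟨hk, hrest⟩ := List.nodup_cons.mp hnd
      rw [List.foldl_cons, ih hrest]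
      have hmod : ∀ (lf : PySem.Dict String (List Int)) (x w : String) (d' : List Int),
          (lf.modify x [] (· ++ [0])).getD w d'
            = if w = x then lf.getD x [] ++ [0] else lf.getD w d' := by
        intro lf x w d'
        show (lf.insert x (lf.getD x [] ++ [0])).getD w d' = _
        exact PySem.Dict.getD_insert ..
      by_cases hc : c k = false
      · rw [if_pos hc]
        by_cases hw : w ∈ rest
        · have hwk : w ≠ k := fun h => hk (h ▸ hw)
          by_cases hcw : c w = false <;> simp [hw, hwk, hcw, hmod]
        · by_cases hwk : w = k
          · subst hwk; simp [hw, hc, hmod]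
          · simp [hw, hwk, hmod]
      · simp only [if_neg hc]
        by_cases hwk : w = k
        · subst hwk
          have hcw : ¬ c w = false := hc
          simp [hcw]
        · simp [hwk]

-- the invariant one step of A's outer loop preserves
theorem pvStepA_keys (dl : List (String × Int)) (i : Nat) (lf : PySem.Dict String (List Int)) :
    (pvStepA dl i lf).keys = PySem.Set.update lf.keys (PySem.Dict.ofList dl).keys := by
  unfold pvStepA
  rw [pvFold2_keys _ _ _ (fun x hx => (PySem.Dict.contains_iff_mem_keys ..).2 hx),
    PySem.Dict.keys_foldl_insert]

theorem pvStepA_getD (dl : List (String × Int)) (ps : List (List (String × Int)))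
    (lf : PySem.Dict String (List Int))
    (hk : lf.keys = pvUnion ps)
    (hg : ∀ (w : String) (d' : List Int), lf.getD w d' = if w ∈ pvUnion ps then pvRow ps w else d')
    (w : String) (d' : List Int) :
    (pvStepA dl ps.length lf).getD w d'
      = if w ∈ pvUnion (ps ++ [dl]) then pvRow (ps ++ [dl]) w else d' := by
  unfold pvStepA
  have hdnd : (PySem.Dict.ofList dl).keys.Nodup := PySem.Dict.nodup_keys_ofList dl
  have hlfnd : lf.keys.Nodup := hk ▸ pvUnion_nodup ps
  have hks2 : (((PySem.Dict.ofList dl).keys.foldl (fun lf word =>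
      lf.insert word (lf.getD word (List.replicate ps.length 0) ++ [(PySem.Dict.ofList dl).getD word 0])) lf)).keys
      = PySem.Set.update lf.keys (PySem.Dict.ofList dl).keys :=
    PySem.Dict.keys_foldl_insert ..
  have hks2nd : (((PySem.Dict.ofList dl).keys.foldl (fun lf word =>
      lf.insert word (lf.getD word (List.replicate ps.length 0) ++ [(PySem.Dict.ofList dl).getD word 0])) lf)).keys.Nodup :=
    PySem.Dict.nodup_keys_foldl_insert _ _ _ hlfnd
  rw [pvFold2_getD _ hks2nd, hks2, hk, pvFold1_getD _ hdnd, pvFold1_getD _ hdnd]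
  have hmem : ∀ v : String, v ∈ PySem.Set.update (pvUnion ps) (PySem.Dict.ofList dl).keys
      ↔ v ∈ pvUnion (ps ++ [dl]) := by
    intro v; rw [pvUnion_append_singleton]
  have hmem' : w ∈ pvUnion (ps ++ [dl]) ↔ w ∈ pvUnion ps ∨ w ∈ (PySem.Dict.ofList dl).keys := by
    rw [← hmem, PySem.Set.mem_update]
  by_cases hd : w ∈ (PySem.Dict.ofList dl).keys
  · -- counted in this dictionary: first loop appended its count
    have hc : (PySem.Dict.ofList dl).contains w = true :=
      (PySem.Dict.contains_iff_mem_keys _ _).2 hd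
    have hin : w ∈ pvUnion (ps ++ [dl]) := hmem'.2 (Or.inr hd)
    rw [if_neg (by simp [hc]), if_pos hd, if_pos hin, hg, pvRow_append_singleton]
    by_cases hu : w ∈ pvUnion ps
    · rw [if_pos hu]
    · rw [if_neg hu, pvRow_eq_replicate ps w hu]
  · have hc : (PySem.Dict.ofList dl).contains w = false := by
      have := (PySem.Dict.contains_iff_mem_keys (PySem.Dict.ofList dl) w)
      cases h : (PySem.Dict.ofList dl).contains w
      · rfl
      · exact absurd (this.1 h) hd
    by_cases hu : w ∈ pvUnion ps
    · -- previously seen, absent here: second loop appended 0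
      have hin : w ∈ pvUnion (ps ++ [dl]) := hmem'.2 (Or.inl hu)
      rw [if_pos ⟨(PySem.Set.mem_update _ _ _).2 (Or.inl hu), hc⟩, if_neg hd, hg, if_pos hu,
        if_pos hin, pvRow_append_singleton,
        PySem.Dict.getD_of_not_contains _ _ hc]
    · have hnin : w ∉ pvUnion (ps ++ [dl]) := fun h => by
        rcases hmem'.1 h with h | h
        · exact hu h
        · exact hd h
      have hnin2 : ¬ (w ∈ PySem.Set.update (pvUnion ps) (PySem.Dict.ofList dl).keys ∧
          (PySem.Dict.ofList dl).contains w = false) := by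
        rintro ⟨h, -⟩
        rcases (PySem.Set.mem_update _ _ _).1 h with h | h
        · exact hu h
        · exact hd h
      rw [if_neg hnin2, if_neg hd, hg, if_neg hu, if_neg hnin]

-- A's fold over range(len) is pvGoA over the list itself.
theorem pvFoldA_eq_goA (all : List (List (String × Int))) :
    ∀ (suffix : List (List (String × Int))) (k : Nat), all.drop k = suffix →
    ∀ lf, (PySem.List.pyRange k all.length 1).foldl (fun lf i =>
        let d := PySem.Dict.ofList ((PySem.List.pyGet? all i).getD [])
        let lf := d.keys.foldl (fun lf word =>
          lf.insert word (lf.getD word (List.replicate i.toNat 0) ++ [d.getD word 0])) lf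
        lf.keys.foldl (fun lf word =>
          if d.contains word = false then lf.modify word [] (· ++ [0]) else lf) lf) lf
      = pvGoA suffix k lf := by
  intro suffix
  induction suffix with
  | nil =>
      intro k hk lf
      have hlen : all.length ≤ k := by
        by_contra h
        have := List.drop_eq_nil_iff.mp hk
        omega
      have : PySem.List.pyRange (k : Int) (all.length : Int) 1 = [] := by
        apply List.eq_nil_iff_forall_not_mem.2
        intro x hx
        have := (PySem.List.mem_pyRange_one ..).1 hx
        omega
      rw [this]; rfl
  | cons dl rest ih =>
      intro k hk lf
      have hklen : k < all.length := by
        by_contra h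
        rw [List.drop_eq_nil_iff.mpr (by omega)] at hk
        exact List.cons_ne_nil _ _ hk.symm
      have hcons : all[k] :: all.drop (k + 1) = dl :: rest :=
        (List.drop_eq_getElem_cons hklen).symm.trans hk
      have hget : all[k] = dl := ((List.cons.injEq ..).mp hcons).1
      have hdrop : all.drop (k + 1) = rest := ((List.cons.injEq ..).mp hcons).2
      rw [PySem.List.pyRange_one_cons (by exact_mod_cast hklen), List.foldl_cons]
      have hpg : (PySem.List.pyGet? all (k : Int)).getD [] = dl := by
        simp [pysem, hklen, hget]
      show (PySem.List.pyRange ((k : Int) + 1) all.length 1).foldl _ _ = _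
      have : ((k : Int) + 1) = ((k + 1 : Nat) : Int) := by push_cast; ring
      rw [this, ih (k + 1) hdrop]
      show pvGoA rest (k + 1) _ = pvGoA rest (k + 1) (pvStepA dl k lf)
      congr 1
      show pvStepA ((PySem.List.pyGet? all (k : Int)).getD []) ((k : Int)).toNat lf = pvStepA dl k lf
      rw [hpg, Int.toNat_natCast]

theorem pvGoA_inv (suffix : List (List (String × Int))) :
    ∀ (ps : List (List (String × Int))) (lf : PySem.Dict String (List Int)),
    lf.keys = pvUnion ps →
    (∀ (w : String) (d' : List Int), lf.getD w d' = if w ∈ pvUnion ps then pvRow ps w else d') →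
    (pvGoA suffix ps.length lf).keys = pvUnion (ps ++ suffix) ∧
    (∀ (w : String) (d' : List Int), (pvGoA suffix ps.length lf).getD w d'
        = if w ∈ pvUnion (ps ++ suffix) then pvRow (ps ++ suffix) w else d') := by
  induction suffix with
  | nil => intro ps lf hk hg; simpa [pvGoA] using ⟨hk, hg⟩
  | cons dl rest ih =>
      intro ps lf hk hg
      have hk' : (pvStepA dl ps.length lf).keys = pvUnion (ps ++ [dl]) := by
        rw [pvStepA_keys, hk, ← pvUnion_append_singleton]
      have hg' := pvStepA_getD dl ps lf hk hg
      have hlen : ps.length + 1 = (ps ++ [dl]).length := by simp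
      have := ih (ps ++ [dl]) (pvStepA dl ps.length lf) hk' hg'
      rw [← hlen] at this
      simpa using this

-- ===== VERDICT (by name: the statement is the Claim_ definition above) =====
theorem merge_lemma_dictionaries_py_spec : Claim_equal_merge_lemma_dictionaries_py := by
  intro all _
  show merge_lemma_dictionaries_py all = merge_lemma_dictionaries_py_alt all
  have hfold := pvFoldA_eq_goA all all 0 rfl PySem.Dict.empty
  have hinv := pvGoA_inv all [] PySem.Dict.empty rfl
    (fun w d' => by simp [pvUnion, PySem.Set.empty, PySem.Dict.getD_empty])
  rw [List.length_nil] at hinv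
  obtain ⟨hkeys, hget⟩ := hinv
  rw [List.nil_append] at hkeys hget
  have hnd : (pvGoA all 0 PySem.Dict.empty).keys.Nodup := hkeys ▸ pvUnion_nodup all
  have hA : merge_lemma_dictionaries_py all = (pvGoA all 0 PySem.Dict.empty).items := by
    rw [← hfold]; rfl
  rw [hA, PySem.Dict.items_eq_map_keys _ hnd [], hkeys]
  unfold merge_lemma_dictionaries_py_alt
  apply List.map_congr_left
  intro w hw
  rw [hget w [], if_pos hw]
  rfl
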